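-- pv_equiv track=rewrite | github.com/RayyanMinhaj/AI-PR-Review-Bot---Jenkins | chess.py | solve
-- ===== SOURCE A (Python) =====
-- GRID_SIZE = 4
--
-- def is_valid_move(grid, row, col, num):
--     """Check if placing a number is a valid move."""
--     return all(grid[row][i] != num for i in range(GRID_SIZE)) and \
--            all(grid[i][col] != num for i in range(GRID_SIZE))
--
-- def find_empty_cell(grid):
--     """Find the next empty cell in the grid."""
--     for row in range(GRID_SIZE):
--         for col in range(GRID_SIZE):
--             if grid[row][col] == 0:
--                 return row, col
--     return None
--
-- def solve(grid):
--     """Solve the Sudoku puzzle using backtracking."""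
--     empty_cell = find_empty_cell(grid)
--     if not empty_cell:
--         return True
--
--     row, col = empty_cell
--     for num in range(1, GRID_SIZE + 1):
--         if is_valid_move(grid, row, col, num):
--             grid[row][col] = num
--             if solve(grid):
--                 return True
--             grid[row][col] = 0
--
--     return False
-- ===== SOURCE B (Python) =====
-- # Two-phase row-level search instead of cell-by-cell backtracking: generate every completion
-- # of each row up front from the row constraint alone, then search over whole-row choices
-- # checking only column compatibility. Return value only: A writes the solution into grid,
-- # B does not mutate grid.
-- GRID_SIZE = 4
--
-- def solve(grid):
--     n = GRID_SIZE
--     col_pre = [{grid[r][c] for r in range(n) if grid[r][c] != 0} for c in range(n)]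
--
--     comps = []
--     for r in range(n):
--         row_pre = {x for x in grid[r][:n] if x != 0}
--         holes = [c for c in range(n) if grid[r][c] == 0]
--         outs = [[]]
--         for c in holes:
--             outs = [done + [(c, v)]
--                     for done in outs
--                     for v in range(1, n + 1)
--                     if v not in row_pre and all(v != w for _, w in done)]
--         comps.append(outs)
--
--     def rows_ok(r, used):
--         if r == n:
--             return True
--         for comp in comps[r]:
--             if all(v not in col_pre[c] and (c, v) not in used for c, v in comp):
--                 if rows_ok(r + 1, used | set(comp)):
--                     return True
--         return False
--
--     return rows_ok(0, set())
-- ===== Notes on version B (the rewrite author's own statement) =====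
-- stated objective: alternative
-- what changed: Replaces cell-by-cell backtracking (rescan for the first empty cell, per-candidate row+column scans) with a two-phase row-level search: all completions of each row are generated up front from the row constraint alone, then a search over whole-row choices checks only column compatibility against a precomputed column set and the placed (col,value) pairs.
-- outside the precondition, e.g. on solve([[0, 2, 3, 4], [1], [2], [3]]): A returns False, B raises IndexError
import Mathlib
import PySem

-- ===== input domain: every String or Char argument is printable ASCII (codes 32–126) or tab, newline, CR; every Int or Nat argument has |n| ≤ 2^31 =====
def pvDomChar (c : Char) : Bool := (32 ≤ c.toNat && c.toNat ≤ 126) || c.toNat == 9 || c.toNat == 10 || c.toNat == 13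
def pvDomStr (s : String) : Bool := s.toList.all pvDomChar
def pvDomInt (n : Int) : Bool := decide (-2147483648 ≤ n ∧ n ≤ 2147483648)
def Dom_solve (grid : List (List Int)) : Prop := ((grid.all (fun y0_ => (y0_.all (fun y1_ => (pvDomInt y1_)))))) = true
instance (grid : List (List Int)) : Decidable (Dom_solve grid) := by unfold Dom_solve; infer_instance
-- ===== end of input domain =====

-- B replaces cell-by-cell backtracking by a two-phase row-level search (all completions of
-- each row generated up front from the row constraint, then a search over whole-row choices
-- checking column compatibility). Equivalence is about the RETURN value only: A writes the
-- solution into grid, B does not mutate it.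

-- ===== PORT A =====
-- grid[r][c] for in-range nonnegative indices (the only ones A uses); out of range Python
-- raises IndexError — those inputs are excluded by Pre_solve below.
def pvCell (g : List (List Int)) (r c : Nat) : Int := (g.getD r []).getD c 0

-- is_valid_move: row scan && column scan, short-circuiting like Python's `and`
def isValidMove (g : List (List Int)) (r c : Nat) (num : Int) : Bool :=
  ((List.range 4).all (fun i => pvCell g r i != num)) &&
  ((List.range 4).all (fun i => pvCell g i c != num))

-- the row-major enumeration order of the two nested loops
def pvPairs : List (Nat × Nat) := (List.range 4).flatMap (fun r => (List.range 4).map (fun c => (r, c)))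

-- find_empty_cell: first (row, col) in row-major order with grid[row][col] == 0
def findEmptyCell (g : List (List Int)) : Option (Nat × Nat) :=
  pvPairs.find? (fun p => pvCell g p.1 p.2 == 0)

-- grid[row][col] = num (in range under Pre_solve; List.set is the in-range write)
def pvSet (g : List (List Int)) (r c : Nat) (v : Int) : List (List Int) :=
  g.set r ((g.getD r []).set c v)

-- solve, with a fuel guard for totality only: each recursive call fills one empty cell of the
-- 4x4 region, so fuel 17 is never exhausted on inputs satisfying Pre_solve.
mutual
def solveAux : Nat → List (List Int) → Bool
  | 0, _ => false
  | fuel+1, g =>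
    match findEmptyCell g with
    | none => true
    | some (r, c) => tryNums fuel g r c [1, 2, 3, 4]
  termination_by fuel g => (fuel, 0)
def tryNums : Nat → List (List Int) → Nat → Nat → List Int → Bool
  | _, _, _, _, [] => false
  | fuel, g, r, c, v :: vs =>
    if isValidMove g r c v then
      (if solveAux fuel (pvSet g r c v) then true else tryNums fuel g r c vs)
    else tryNums fuel g r c vs
  termination_by fuel g r c vs => (fuel, vs.length + 1)
end

def solve (grid : List (List Int)) : Bool := solveAux 17 grid

-- ===== PORT B =====
-- col_pre = [{grid[r][c] for r in range(n) if grid[r][c] != 0} for c in range(n)]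
def colPre (g : List (List Int)) : List (PySem.Set Int) :=
  (List.range 4).map (fun c =>
    PySem.Set.ofList (((List.range 4).map (fun r => pvCell g r c)).filter (fun x => x != 0)))

-- row_pre = {x for x in grid[r][:n] if x != 0}
def rowPreB (g : List (List Int)) (r : Nat) : PySem.Set Int :=
  PySem.Set.ofList (((g.getD r []).take 4).filter (fun x => x != 0))

-- holes = [c for c in range(n) if grid[r][c] == 0]
def holesB (g : List (List Int)) (r : Nat) : List Nat :=
  (List.range 4).filter (fun c => pvCell g r c == 0)

-- the body of B's `for c in holes: outs = [done + [(c, v)] for done in outs for v in ... if ...]`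
def compStep (rp : PySem.Set Int) (outs : List (List (Nat × Int))) (c : Nat) : List (List (Nat × Int)) :=
  outs.flatMap (fun done =>
    ([1, 2, 3, 4] : List Int).flatMap (fun v =>
      if !(rp.contains v) && done.all (fun p => p.2 != v) then [done ++ [(c, v)]] else []))

-- row_completions of row r (B builds comps by appending these for r in range(n))
def rowComps (g : List (List Int)) (r : Nat) : List (List (Nat × Int)) :=
  (holesB g r).foldl (compStep (rowPreB g r)) [[]]

-- rows_ok(r, used), recursion over the per-row completion lists
def rowsOkB (colpre : List (PySem.Set Int)) : List (List (List (Nat × Int))) → PySem.Set (Nat × Int) → Bool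
  | [], _ => true
  | rcomps :: rest, used =>
    rcomps.any (fun comp =>
      comp.all (fun p => !((colpre.getD p.1 PySem.Set.empty).contains p.2) && !(used.contains p)) &&
      rowsOkB colpre rest (PySem.Set.union used (PySem.Set.ofList comp)))

def solve_alt (grid : List (List Int)) : Bool :=
  rowsOkB (colPre grid) ((List.range 4).map (fun r => rowComps grid r)) PySem.Set.empty

-- ===== PRECONDITION & SPEC =====
-- Pre_solve: a full 4x4 region (≥4 rows, each of the first 4 with ≥4 cells). Outside it the
-- indexing grid[r][c] raises IndexError in both Pythons on almost all inputs; on the rare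
-- ragged grids where A's short-circuited scans happen to return False, B still raises, so
-- those inputs are excluded too.
def Pre_solve (grid : List (List Int)) : Prop :=
  4 ≤ grid.length ∧ ∀ r ∈ List.range 4, 4 ≤ (grid.getD r []).length
instance (grid : List (List Int)) : Decidable (Pre_solve grid) := by unfold Pre_solve; infer_instance

def pvWitness_solve : List (List Int) :=
  [[1, 2, 3, 4], [3, 4, 1, 2], [0, 0, 0, 0], [0, 0, 0, 0]]

def Spec_solve (grid : List (List Int)) (out : Bool) : Prop := out = solve_alt grid
instance (grid : List (List Int)) (out : Bool) : Decidable (Spec_solve grid out) := by unfold Spec_solve; infer_instance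

-- ===== CLAIM (what is proved, stated in full; the proofs are below) =====
def Claim_equal_solve : Prop := ∀ (grid : List (List Int)), Dom_solve grid → Pre_solve grid → Spec_solve grid (solve grid)

-- ===== LEMMAS AND PROOFS =====

-- Reference search: A's backtracking driven by an explicit cell list instead of rescanning.
mutual
def searchS : List (Nat × Nat) → List (List Int) → Bool
  | [], _ => true
  | (r, c) :: es, g => tryS es g r c [1, 2, 3, 4]
  termination_by es g => (es.length, 0)
def tryS : List (Nat × Nat) → List (List Int) → Nat → Nat → List Int → Bool
  | _, _, _, _, [] => false
  | es, g, r, c, v :: vs =>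
    if isValidMove g r c v then
      (if searchS es (pvSet g r c v) then true else tryS es g r c vs)
    else tryS es g r c vs
  termination_by es g r c vs => (es.length, vs.length + 1)
end

def zeros (g : List (List Int)) : List (Nat × Nat) :=
  pvPairs.filter (fun p => pvCell g p.1 p.2 == 0)

lemma mem_pvPairs (p : Nat × Nat) (h : p ∈ pvPairs) : p.1 < 4 ∧ p.2 < 4 := by
  fin_cases h <;> decide

lemma pvPairs_nodup : pvPairs.Nodup := by decide

lemma getD_set' {α : Type} (l : List α) (i j : Nat) (x d : α) :
    (l.set i x).getD j d = if i = j ∧ i < l.length then x else l.getD j d := by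
  by_cases h : i = j
  · subst h
    by_cases hl : i < l.length <;> simp [List.getD_eq_getElem?_getD, List.getElem?_set, hl]
  · simp [List.getD_eq_getElem?_getD, List.getElem?_set, h]

lemma pvCell_pvSet_ne (g : List (List Int)) (r c : Nat) (v : Int) (p : Nat × Nat)
    (h : p ≠ (r, c)) : pvCell (pvSet g r c v) p.1 p.2 = pvCell g p.1 p.2 := by
  rcases p with ⟨a, b⟩
  simp only [pvCell, pvSet]
  by_cases h1 : r = a
  · subst h1
    have h2 : c ≠ b := fun h2 => h (by simp [h2.symm])
    rw [getD_set']
    split_ifs with h3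
    · rw [getD_set', if_neg (by rintro ⟨hcb, -⟩; exact h2 hcb)]
    · rfl
  · rw [getD_set', if_neg (by rintro ⟨h3, -⟩; exact h1 h3)]

lemma pvCell_pvSet_self (g : List (List Int)) (r c : Nat) (v : Int)
    (hr : r < g.length) (hc : c < (g.getD r []).length) :
    pvCell (pvSet g r c v) r c = v := by
  simp only [pvCell, pvSet]
  rw [getD_set', if_pos ⟨rfl, hr⟩, getD_set', if_pos ⟨rfl, hc⟩]

lemma pre_pvSet (g : List (List Int)) (r c : Nat) (v : Int) (h : Pre_solve g) :
    Pre_solve (pvSet g r c v) := by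
  obtain ⟨h1, h2⟩ := h
  refine ⟨by simpa [pvSet] using h1, ?_⟩
  intro r' hr'
  rw [pvSet, getD_set']
  split_ifs with h3
  · rw [List.length_set, h3.1]
    exact h2 r' hr'
  · exact h2 r' hr'

lemma pvCell_eq_getElem (g : List (List Int)) (r c : Nat) (hc : c < (g.getD r []).length) :
    pvCell g r c = (g.getD r [])[c] := by
  show (g.getD r []).getD c 0 = _
  rw [List.getD_eq_getElem?_getD (l := g.getD r []) (i := c), List.getElem?_eq_getElem hc]
  rfl

lemma find?_eq_head?_filter {α : Type} (p : α → Bool) (l : List α) :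
    l.find? p = (l.filter p).head? := by
  induction l with
  | nil => rfl
  | cons x xs ih =>
    by_cases h : p x
    · rw [List.find?_cons_of_pos h, List.filter_cons_of_pos h]; rfl
    · rw [List.find?_cons_of_neg h, List.filter_cons_of_neg h, ih]

-- the first flipped-to-false element drops off the front of the filter
lemma filter_flip_head {α : Type} [DecidableEq α] (a : α) (p q : α → Bool) :
    ∀ l : List α, l.Nodup → (∀ x, x ≠ a → q x = p x) → q a = false →
      (l.filter p).head? = some a → l.filter q = (l.filter p).tail := by
  intro l
  induction l with
  | nil => intro _ _ _ hh; simp at hh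
  | cons x xs ih =>
    intro hnd hq hqa hh
    rw [List.filter_cons] at hh
    rw [List.filter_cons, List.filter_cons]
    by_cases hp : p x
    · rw [if_pos (by simpa using hp)] at hh
      have hxa : x = a := by simpa using hh
      subst hxa
      have hxnot : x ∉ xs := (List.nodup_cons.1 hnd).1
      rw [if_neg (by simp [hqa]), if_pos (by simpa using hp), List.tail_cons]
      exact List.filter_congr (fun y hy => hq y (fun h' => hxnot (h' ▸ hy)))
    · rw [if_neg (by simpa using hp)] at hh
      have hxa : x ≠ a := fun h' => by
        subst h'
        exact hp (List.of_mem_filter (List.mem_of_mem_head? hh))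
      rw [if_neg (by rw [hq x hxa]; simpa using hp), if_neg (by simpa using hp)]
      exact ih (List.nodup_cons.1 hnd).2 hq hqa hh

lemma zeros_pvSet (g : List (List Int)) (r c : Nat) (v : Int) (hv : v ≠ 0)
    (hg : Pre_solve g) (hhead : (zeros g).head? = some (r, c)) :
    zeros (pvSet g r c v) = (zeros g).tail := by
  have hmem : (r, c) ∈ zeros g := List.mem_of_mem_head? hhead
  have hmem2 := List.mem_filter.1 hmem
  have hrc := mem_pvPairs _ hmem2.1
  unfold zeros at hhead ⊢
  apply filter_flip_head (r, c) _ _ pvPairs pvPairs_nodup _ _ hhead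
  · intro x hx
    rw [pvCell_pvSet_ne g r c v x hx]
  · have hself : pvCell (pvSet g r c v) r c = v :=
      pvCell_pvSet_self g r c v (lt_of_lt_of_le hrc.1 hg.1)
        (lt_of_lt_of_le hrc.2 (hg.2 r (List.mem_range.2 hrc.1)))
    simp [hself, hv]

lemma solveAux_eq_searchS : ∀ fuel g, Pre_solve g → (zeros g).length < fuel →
    solveAux fuel g = searchS (zeros g) g := by
  intro fuel
  induction fuel with
  | zero => intro g _ hlen; omega
  | succ fuel ih =>
    intro g hpre hlen
    rw [solveAux]
    rw [show findEmptyCell g = (zeros g).head? from find?_eq_head?_filter _ _]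
    cases hz : zeros g with
    | nil => simp [searchS]
    | cons p es =>
      obtain ⟨r, c⟩ := p
      have hvne : ∀ v : Int, v ∈ ([1, 2, 3, 4] : List Int) → v ≠ 0 := by decide
      have key : ∀ vs : List Int, (∀ v ∈ vs, v ∈ ([1, 2, 3, 4] : List Int)) →
          tryNums fuel g r c vs = tryS es g r c vs := by
        intro vs hvs
        induction vs with
        | nil => rw [tryNums, tryS]
        | cons v vs ihv =>
          have hv := hvs v List.mem_cons_self
          have hvs' : ∀ u ∈ vs, u ∈ ([1, 2, 3, 4] : List Int) :=
            fun u hu => hvs u (List.mem_cons_of_mem _ hu)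
          rw [tryNums, tryS]
          by_cases hval : isValidMove g r c v
          · have hz' : zeros (pvSet g r c v) = es := by
              rw [zeros_pvSet g r c v (hvne v hv) hpre (by rw [hz]; rfl), hz, List.tail_cons]
            have hrec : solveAux fuel (pvSet g r c v) = searchS es (pvSet g r c v) := by
              rw [ih (pvSet g r c v) (pre_pvSet g r c v hpre) (by rw [hz']; rw [hz] at hlen; simp at hlen; omega), hz']
            rw [if_pos hval, if_pos hval, hrec, ihv hvs']
          · rw [if_neg hval, if_neg hval, ihv hvs']
      simp only [List.head?_cons]
      rw [searchS]
      exact key [1, 2, 3, 4] (fun v hv => hv)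

-- ---------- bridge from searchS to a per-row decomposition ----------

def rowZeros (g : List (List Int)) (a : Nat) : List (Nat × Nat) :=
  (holesB g a).map (fun c => (a, c))

lemma flatMap_filter {α β : Type} (p : β → Bool) (f : α → List β) (l : List α) :
    (l.flatMap f).filter p = l.flatMap (fun a => (f a).filter p) := by
  induction l with
  | nil => rfl
  | cons a l ih => simp [List.flatMap_cons, List.filter_append, ih]

lemma zeros_eq_flatMap (g : List (List Int)) :
    zeros g = (List.range 4).flatMap (rowZeros g) := by
  unfold zeros pvPairs
  rw [flatMap_filter]
  refine congrArg (fun f => List.flatMap f (List.range 4)) (funext fun r => ?_)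
  rw [List.filter_map]
  rfl

-- apply a list of (cell, value) placements along a cell list, with A's per-step check
def apply? : List (Nat × Nat) → List Int → List (List Int) → Option (List (List Int))
  | [], [], g => some g
  | (r, c) :: es, v :: vs, g =>
      if ([1, 2, 3, 4] : List Int).contains v && isValidMove g r c v then
        apply? es vs (pvSet g r c v)
      else none
  | _, _, _ => none

lemma tryS_iff (es : List (Nat × Nat)) (g : List (List Int)) (r c : Nat) :
    ∀ cands : List Int, (tryS es g r c cands = true ↔
      ∃ v ∈ cands, isValidMove g r c v = true ∧ searchS es (pvSet g r c v) = true) := by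
  intro cands
  induction cands with
  | nil => rw [tryS]; simp
  | cons v vs ih =>
    rw [tryS]
    by_cases hval : isValidMove g r c v
    · rw [if_pos hval]
      by_cases hs : searchS es (pvSet g r c v)
      · simp [hs, hval]
      · simp only [Bool.not_eq_true] at hs
        simp [hs, ih, hval]
    · simp only [Bool.not_eq_true] at hval
      simp [hval, ih]

lemma searchS_append_iff : ∀ (es1 es2 : List (Nat × Nat)) (g : List (List Int)),
    (searchS (es1 ++ es2) g = true ↔
      ∃ vs h, apply? es1 vs g = some h ∧ searchS es2 h = true) := by
  intro es1
  induction es1 with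
  | nil =>
    intro es2 g
    constructor
    · intro h; exact ⟨[], g, rfl, h⟩
    · rintro ⟨vs, h, happ, hs⟩
      cases vs with
      | nil => cases happ; exact hs
      | cons v vs => exact absurd happ (by simp [apply?])
  | cons e es1 ih =>
    intro es2 g
    obtain ⟨r, c⟩ := e
    rw [List.cons_append, searchS, tryS_iff]
    constructor
    · rintro ⟨v, hv, hval, hs⟩
      obtain ⟨vs, h, happ, hs2⟩ := (ih es2 _).1 hs
      refine ⟨v :: vs, h, ?_, hs2⟩
      rw [apply?, if_pos (by simp [hval, hv])]
      exact happ
    · rintro ⟨vs, h, happ, hs2⟩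
      cases vs with
      | nil => exact absurd happ (by simp [apply?])
      | cons v vs =>
        rw [apply?] at happ
        by_cases hg : (([1, 2, 3, 4] : List Int).contains v && isValidMove g r c v) = true
        · rw [if_pos hg] at happ
          obtain ⟨h1, h2⟩ := Bool.and_eq_true_iff.1 hg
          exact ⟨v, by simpa using h1, h2, (ih es2 _).2 ⟨vs, h, happ, hs2⟩⟩
        · rw [if_neg hg] at happ; cases happ

-- ---------- B-side characterizations ----------

lemma mem_holesB (g : List (List Int)) (a c : Nat) :
    c ∈ holesB g a ↔ c < 4 ∧ pvCell g a c = 0 := by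
  simp [holesB, List.mem_filter, List.mem_range, and_comm]

lemma nodup_holesB (g : List (List Int)) (a : Nat) : (holesB g a).Nodup :=
  (List.nodup_range).filter _

-- the valid extensions a run of B's inner comprehension produces
def RowTailOk (rp : PySem.Set Int) : List (Nat × Int) → List Nat → List (Nat × Int) → Prop
  | _, [], tail => tail = []
  | done, c :: hs, tail =>
      match tail with
      | [] => False
      | (c', v) :: t => c' = c ∧ v ∈ ([1, 2, 3, 4] : List Int) ∧ rp.contains v = false ∧
          (∀ p ∈ done, p.2 ≠ v) ∧ RowTailOk rp (done ++ [(c, v)]) hs t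

lemma mem_compStep (rp : PySem.Set Int) (outs : List (List (Nat × Int))) (c : Nat)
    (x : List (Nat × Int)) :
    x ∈ compStep rp outs c ↔ ∃ done ∈ outs, ∃ v, v ∈ ([1, 2, 3, 4] : List Int) ∧
      rp.contains v = false ∧ (∀ p ∈ done, p.2 ≠ v) ∧ x = done ++ [(c, v)] := by
  simp only [compStep, List.mem_flatMap]
  constructor
  · rintro ⟨done, hd, v, hvmem, hx⟩
    by_cases hcond : (!(rp.contains v) && done.all (fun p => p.2 != v)) = true
    · rw [if_pos hcond] at hx
      obtain ⟨h1, h2⟩ := Bool.and_eq_true_iff.1 hcond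
      refine ⟨done, hd, v, hvmem, by simpa using h1, ?_, by simpa using hx⟩
      intro p hp
      have := List.all_eq_true.1 h2 p hp
      simpa using this
    · rw [if_neg hcond] at hx; simp at hx
  · rintro ⟨done, hd, v, hvmem, h1, h2, hx⟩
    refine ⟨done, hd, v, hvmem, ?_⟩
    rw [if_pos]
    · simp [hx]
    · simp only [Bool.and_eq_true, Bool.not_eq_true', List.all_eq_true]
      exact ⟨h1, fun p hp => by simpa using h2 p hp⟩

lemma mem_foldl_compStep (rp : PySem.Set Int) :
    ∀ (hs : List Nat) (outs : List (List (Nat × Int))) (x : List (Nat × Int)),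
      x ∈ hs.foldl (compStep rp) outs ↔
        ∃ done ∈ outs, ∃ tail, x = done ++ tail ∧ RowTailOk rp done hs tail := by
  intro hs
  induction hs with
  | nil =>
    intro outs x
    simp only [List.foldl_nil, RowTailOk]
    constructor
    · intro h; exact ⟨x, h, [], by simp, rfl⟩
    · rintro ⟨done, hd, tail, hx, ht⟩
      subst ht
      simp only [List.append_nil] at hx
      subst hx
      exact hd
  | cons c hs ih =>
    intro outs x
    rw [List.foldl_cons, ih]
    constructor
    · rintro ⟨d', hd', tail, hx, ht⟩
      obtain ⟨done, hd, v, hvmem, h1, h2, hde⟩ := (mem_compStep rp outs c d').1 hd'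
      subst hde
      refine ⟨done, hd, (c, v) :: tail, by simp [hx], ?_⟩
      exact ⟨rfl, hvmem, h1, h2, ht⟩
    · rintro ⟨done, hd, tail, hx, ht⟩
      cases tail with
      | nil => exact absurd ht (by simp [RowTailOk])
      | cons p t =>
        obtain ⟨pc, pv⟩ := p
        obtain ⟨hpc, hvmem, h1, h2, ht'⟩ := ht
        subst hpc
        refine ⟨done ++ [(pc, pv)],
          (mem_compStep rp outs pc _).2 ⟨done, hd, pv, hvmem, h1, h2, rfl⟩,
          t, by simp [hx], ht'⟩

lemma mem_rowComps (g : List (List Int)) (a : Nat) (comp : List (Nat × Int)) :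
    comp ∈ rowComps g a ↔ RowTailOk (rowPreB g a) [] (holesB g a) comp := by
  rw [rowComps, mem_foldl_compStep]
  constructor
  · rintro ⟨done, hd, tail, hx, ht⟩
    simp only [List.mem_singleton] at hd
    subst hd; simpa [hx] using ht
  · intro h; exact ⟨[], by simp, comp, by simp, h⟩

lemma rowTailOk_cols (rp : PySem.Set Int) :
    ∀ (hs : List Nat) (done tail : List (Nat × Int)),
      RowTailOk rp done hs tail → tail.map Prod.fst = hs := by
  intro hs
  induction hs with
  | nil => intro done tail h; simp [RowTailOk] at h; simp [h]
  | cons c hs ih =>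
    intro done tail h
    cases tail with
    | nil => exact absurd h (by simp [RowTailOk])
    | cons p t =>
      obtain ⟨pc, pv⟩ := p
      obtain ⟨hpc, _, _, _, ht⟩ := h
      subst hpc
      simp [ih _ _ ht]

-- ---------- applyRow ----------

def applyRow (a : Nat) (tail : List (Nat × Int)) (h : List (List Int)) : List (List Int) :=
  tail.foldl (fun h p => pvSet h a p.1 p.2) h

lemma applyRow_nil (a : Nat) (h : List (List Int)) : applyRow a [] h = h := rfl

lemma applyRow_cons (a : Nat) (p : Nat × Int) (t : List (Nat × Int)) (h : List (List Int)) :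
    applyRow a (p :: t) h = applyRow a t (pvSet h a p.1 p.2) := rfl

lemma pre_applyRow (a : Nat) :
    ∀ (tail : List (Nat × Int)) (h : List (List Int)), Pre_solve h →
      Pre_solve (applyRow a tail h) := by
  intro tail
  induction tail with
  | nil => intro h hp; exact hp
  | cons p t ih => intro h hp; rw [applyRow_cons]; exact ih _ (pre_pvSet _ _ _ _ hp)

lemma pvCell_applyRow_ne_row (a : Nat) :
    ∀ (tail : List (Nat × Int)) (h : List (List Int)) (i b : Nat), i ≠ a →
      pvCell (applyRow a tail h) i b = pvCell h i b := by
  intro tail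
  induction tail with
  | nil => intro h i b _; rfl
  | cons p t ih =>
    intro h i b hia
    rw [applyRow_cons, ih _ _ _ hia, pvCell_pvSet_ne _ _ _ _ (i, b) (by simp [hia])]

lemma pvCell_applyRow_not_col (a : Nat) :
    ∀ (tail : List (Nat × Int)) (h : List (List Int)) (b : Nat), b ∉ tail.map Prod.fst →
      pvCell (applyRow a tail h) a b = pvCell h a b := by
  intro tail
  induction tail with
  | nil => intro h b _; rfl
  | cons p t ih =>
    intro h b hb
    simp only [List.map_cons, List.mem_cons, not_or] at hb
    rw [applyRow_cons, ih _ _ hb.2,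
      pvCell_pvSet_ne _ _ _ _ (a, b) (by simp; intro h'; exact absurd h' hb.1)]

lemma pvCell_applyRow_mem (a : Nat) (ha : a < 4) :
    ∀ (tail : List (Nat × Int)) (h : List (List Int)) (c : Nat) (v : Int),
      Pre_solve h → (tail.map Prod.fst).Nodup → (∀ p ∈ tail, p.1 < 4) →
      (c, v) ∈ tail → pvCell (applyRow a tail h) a c = v := by
  intro tail
  induction tail with
  | nil => intro h c v _ _ _ hm; simp at hm
  | cons p t ih =>
    intro h c v hp hnd hlt hm
    rcases List.mem_cons.1 hm with hm | hm
    · subst hm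
      rw [applyRow_cons,
        pvCell_applyRow_not_col a t _ c (by simpa using (List.nodup_cons.1 hnd).1),
        pvCell_pvSet_self _ _ _ _
          (lt_of_lt_of_le ha hp.1)
          (lt_of_lt_of_le (hlt (c, v) List.mem_cons_self) (hp.2 a (List.mem_range.2 ha)))]
    · rw [applyRow_cons]
      exact ih _ _ _ (pre_pvSet _ _ _ _ hp) (List.nodup_cons.1 hnd).2
        (fun q hq => hlt q (List.mem_cons_of_mem _ hq)) hm

-- ---------- membership in the precomputed sets ----------

lemma mem_rowPreB (g : List (List Int)) (a : Nat) (v : Int)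
    (hpre : Pre_solve g) (ha : a < 4) :
    (rowPreB g a).contains v = true ↔ v ≠ 0 ∧ ∃ b, b < 4 ∧ pvCell g a b = v := by
  have hlen : 4 ≤ (g.getD a []).length := hpre.2 a (List.mem_range.2 ha)
  rw [rowPreB, PySem.Set.contains_iff, PySem.Set.mem_ofList, List.mem_filter]
  constructor
  · rintro ⟨hmem, hne⟩
    obtain ⟨j, hj, he⟩ := List.mem_take_iff_getElem.1 hmem
    have hj4 : j < 4 := lt_of_lt_of_le hj (min_le_left _ _)
    exact ⟨by simpa using hne, j, hj4, by rw [pvCell_eq_getElem g a j (by omega)]; exact he⟩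
  · rintro ⟨hne, b, hb, he⟩
    refine ⟨List.mem_take_iff_getElem.2 ⟨b, lt_min hb (by omega), ?_⟩, by simpa using hne⟩
    rw [← pvCell_eq_getElem g a b (by omega)]; exact he

lemma mem_colPre (g : List (List Int)) (c : Nat) (v : Int) (hc : c < 4) :
    ((colPre g).getD c PySem.Set.empty).contains v = true ↔
      v ≠ 0 ∧ ∃ i, i < 4 ∧ pvCell g i c = v := by
  rw [colPre, List.getD_eq_getElem?_getD, List.getElem?_map, List.getElem?_range hc]
  simp only [Option.map_some, Option.getD_some]
  rw [PySem.Set.contains_iff, PySem.Set.mem_ofList, List.mem_filter]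
  simp only [List.mem_map, List.mem_range, bne_iff_ne, ne_eq]
  constructor
  · rintro ⟨⟨i, hi, he⟩, hne⟩; exact ⟨hne, i, hi, he⟩
  · rintro ⟨hne, i, hi, he⟩; exact ⟨⟨i, hi, he⟩, hne⟩

lemma isValid_iff (h : List (List Int)) (a c : Nat) (v : Int) :
    isValidMove h a c v = true ↔
      (∀ b, b < 4 → pvCell h a b ≠ v) ∧ (∀ i, i < 4 → pvCell h i c ≠ v) := by
  simp [isValidMove, List.all_eq_true, List.mem_range, bne_iff_ne]

lemma mem1234_ne_zero (v : Int) (h : v ∈ ([1, 2, 3, 4] : List Int)) : v ≠ 0 := by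
  simp only [List.mem_cons, List.not_mem_nil, or_false] at h
  rcases h with h | h | h | h <;> omega

-- ---------- the global invariant across rows ----------

def RowsInv (g g' : List (List Int)) (rs : List Nat) (used : PySem.Set (Nat × Int)) : Prop :=
  Pre_solve g' ∧
  (∀ a ∈ rs, ∀ b, b < 4 → pvCell g' a b = pvCell g a b) ∧
  (∀ i, i < 4 → i ∉ rs → ∀ b, b < 4 →
      (pvCell g i b ≠ 0 → pvCell g' i b = pvCell g i b) ∧
      (pvCell g i b = 0 → used.contains (b, pvCell g' i b) = true)) ∧
  (∀ c v, used.contains (c, v) = true →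
      ∃ i, i < 4 ∧ i ∉ rs ∧ pvCell g i c = 0 ∧ pvCell g' i c = v)

lemma contains_union_ofList (used : PySem.Set (Nat × Int)) (comp : List (Nat × Int))
    (x : Nat × Int) :
    (PySem.Set.union used (PySem.Set.ofList comp)).contains x = true ↔
      used.contains x = true ∨ x ∈ comp := by
  rw [PySem.Set.contains_iff, PySem.Set.mem_union, PySem.Set.contains_iff, PySem.Set.mem_ofList]

-- A valid placement check at an intermediate grid, rephrased through B's precomputed data.
lemma valid_iff (g g' h : List (List Int)) (a : Nat) (rs : List Nat)
    (used : PySem.Set (Nat × Int)) (done : List (Nat × Int)) (c : Nat) (v : Int)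
    (hpreg : Pre_solve g) (hinv : RowsInv g g' (a :: rs) used) (ha : a < 4)
    (hra1 : ∀ b, b < 4 → pvCell g a b ≠ 0 → pvCell h a b = pvCell g a b)
    (hra2 : ∀ p ∈ done, p.1 < 4 ∧ pvCell h a p.1 = p.2 ∧ pvCell g a p.1 = 0)
    (hra3 : ∀ b, b < 4 → pvCell g a b = 0 → pvCell h a b ≠ 0 →
       ∃ p ∈ done, p.1 = b ∧ p.2 = pvCell h a b)
    (hoff : ∀ i, i < 4 → i ≠ a → ∀ b, b < 4 → pvCell h i b = pvCell g' i b)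
    (hc : c < 4) (hgac : pvCell g a c = 0) (hhac : pvCell h a c = 0)
    (hv : v ∈ ([1, 2, 3, 4] : List Int)) :
    isValidMove h a c v = true ↔
      ((rowPreB g a).contains v = false ∧ (∀ p ∈ done, p.2 ≠ v) ∧
       ((colPre g).getD c PySem.Set.empty).contains v = false ∧
       used.contains (c, v) = false) := by
  obtain ⟨hpre', hrsame, hrdone, hrused⟩ := hinv
  have hv0 : v ≠ 0 := mem1234_ne_zero v hv
  rw [isValid_iff]
  constructor
  · rintro ⟨hrow, hcol⟩
    refine ⟨?_, ?_, ?_, ?_⟩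
    · by_contra hcontra
      rw [Bool.not_eq_false] at hcontra
      obtain ⟨-, b, hb, he⟩ := (mem_rowPreB g a v hpreg ha).1 hcontra
      exact hrow b hb (by rw [hra1 b hb (by rw [he]; exact hv0)]; exact he)
    · intro p hp hpv
      obtain ⟨hp1, hp2, -⟩ := hra2 p hp
      exact hrow p.1 hp1 (by rw [hp2]; exact hpv)
    · by_contra hcontra
      rw [Bool.not_eq_false] at hcontra
      obtain ⟨-, i, hi, he⟩ := (mem_colPre g c v hc).1 hcontra
      have hia : i ≠ a := fun hx => by rw [hx, hgac] at he; exact hv0 he.symm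
      refine hcol i hi ?_
      rw [hoff i hi hia c hc]
      by_cases hmem : i ∈ a :: rs
      · rcases List.mem_cons.1 hmem with hx | hx
        · exact absurd hx hia
        · rw [hrsame i (List.mem_cons_of_mem _ hx) c hc]; exact he
      · rw [(hrdone i hi hmem c hc).1 (by rw [he]; exact hv0)]; exact he
    · by_contra hcontra
      rw [Bool.not_eq_false] at hcontra
      obtain ⟨i, hi, hni, -, he'⟩ := hrused c v hcontra
      have hia : i ≠ a := fun hx => hni (hx ▸ List.mem_cons_self)
      exact hcol i hi (by rw [hoff i hi hia c hc]; exact he')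
  · rintro ⟨h1, h2, h3, h4⟩
    constructor
    · intro b hb he
      by_cases hz : pvCell g a b = 0
      · obtain ⟨p, hp, hp1, hp2⟩ := hra3 b hb hz (by rw [he]; exact hv0)
        exact h2 p hp (by rw [hp2, he])
      · rw [hra1 b hb hz] at he
        have hx := (mem_rowPreB g a v hpreg ha).2 ⟨hv0, b, hb, he⟩
        rw [h1] at hx
        exact Bool.false_ne_true hx
    · intro i hi he
      by_cases hia : i = a
      · rw [hia, hhac] at he; exact hv0 he.symm
      · rw [hoff i hi hia c hc] at he
        by_cases hmem : i ∈ a :: rs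
        · rcases List.mem_cons.1 hmem with hx | hx
          · exact absurd hx hia
          · rw [hrsame i (List.mem_cons_of_mem _ hx) c hc] at he
            have hx' := (mem_colPre g c v hc).2 ⟨hv0, i, hi, he⟩
            rw [h3] at hx'
            exact Bool.false_ne_true hx'
        · by_cases hz : pvCell g i c = 0
          · have hx' := ((hrdone i hi hmem c hc).2 hz)
            rw [he] at hx'
            rw [h4] at hx'
            exact Bool.false_ne_true hx'
          · rw [(hrdone i hi hmem c hc).1 hz] at he
            have hx' := (mem_colPre g c v hc).2 ⟨hv0, i, hi, he⟩
            rw [h3] at hx'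
            exact Bool.false_ne_true hx'

-- The heart of the per-row correspondence: placing values cell by cell along the holes of
-- one row succeeds exactly on B's row completions that also pass B's column check.
lemma row_apply_iff (g g' : List (List Int)) (a : Nat) (rs : List Nat)
    (used : PySem.Set (Nat × Int))
    (hpreg : Pre_solve g) (hinv : RowsInv g g' (a :: rs) used) (ha : a < 4) :
    ∀ (hs : List Nat) (done : List (Nat × Int)) (h : List (List Int)),
    hs.Nodup →
    (∀ p ∈ done, p.1 ∉ hs) →
    (∀ b, b < 4 → pvCell g a b ≠ 0 → pvCell h a b = pvCell g a b) →
    (∀ p ∈ done, p.1 < 4 ∧ pvCell h a p.1 = p.2 ∧ pvCell g a p.1 = 0) →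
    (∀ b, b < 4 → pvCell g a b = 0 → pvCell h a b ≠ 0 →
       ∃ p ∈ done, p.1 = b ∧ p.2 = pvCell h a b) →
    (∀ c ∈ hs, c < 4 ∧ pvCell g a c = 0 ∧ pvCell h a c = 0) →
    (∀ i, i < 4 → i ≠ a → ∀ b, b < 4 → pvCell h i b = pvCell g' i b) →
    Pre_solve h →
    ∀ (vs : List Int) (res : List (List Int)),
      (apply? (hs.map (fun c => (a, c))) vs h = some res ↔
        ∃ tail, vs = tail.map Prod.snd ∧ RowTailOk (rowPreB g a) done hs tail ∧
          (∀ p ∈ tail, ((colPre g).getD p.1 PySem.Set.empty).contains p.2 = false ∧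
            used.contains p = false) ∧
          res = applyRow a tail h) := by
  intro hs
  induction hs with
  | nil =>
    intro done h _ _ _ _ _ _ _ _ vs res
    cases vs with
    | nil =>
      simp only [List.map_nil, apply?, Option.some.injEq]
      constructor
      · intro he; exact ⟨[], rfl, rfl, by simp, he.symm⟩
      · rintro ⟨tail, hvs, ht, -, hres⟩
        simp only [RowTailOk] at ht
        subst ht; simp [hres, applyRow_nil]
    | cons v vs =>
      constructor
      · intro he; exact absurd he (by simp [apply?])
      · rintro ⟨tail, hvs, ht, -, -⟩
        simp only [RowTailOk] at ht
        subst ht; simp at hvs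
  | cons c hs ih =>
    intro done h hnd hdisj hra1 hra2 hra3 hhs hoff hpreh vs res
    obtain ⟨hc4, hgac, hhac⟩ := hhs c List.mem_cons_self
    cases vs with
    | nil =>
      constructor
      · intro he; exact absurd he (by simp [apply?])
      · rintro ⟨tail, hvs, ht, -, -⟩
        cases tail with
        | nil => exact absurd ht (by simp [RowTailOk])
        | cons p t => simp at hvs
    | cons v vs =>
      -- re-establishment of the invariants after one placement, for any candidate v
      have hreest : ∀ w : Int,
          (∀ p ∈ done ++ [(c, w)], p.1 ∉ hs) ∧
          (∀ b, b < 4 → pvCell g a b ≠ 0 → pvCell (pvSet h a c w) a b = pvCell g a b) ∧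
          (∀ p ∈ done ++ [(c, w)], p.1 < 4 ∧ pvCell (pvSet h a c w) a p.1 = p.2 ∧
            pvCell g a p.1 = 0) ∧
          (∀ b, b < 4 → pvCell g a b = 0 → pvCell (pvSet h a c w) a b ≠ 0 →
            ∃ p ∈ done ++ [(c, w)], p.1 = b ∧ p.2 = pvCell (pvSet h a c w) a b) ∧
          (∀ c' ∈ hs, c' < 4 ∧ pvCell g a c' = 0 ∧ pvCell (pvSet h a c w) a c' = 0) ∧
          (∀ i, i < 4 → i ≠ a → ∀ b, b < 4 → pvCell (pvSet h a c w) i b = pvCell g' i b) ∧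
          Pre_solve (pvSet h a c w) := by
        intro w
        have hcself : pvCell (pvSet h a c w) a c = w :=
          pvCell_pvSet_self h a c w (lt_of_lt_of_le ha hpreh.1)
            (lt_of_lt_of_le hc4 (hpreh.2 a (List.mem_range.2 ha)))
        have hcne : ∀ b, b ≠ c → pvCell (pvSet h a c w) a b = pvCell h a b :=
          fun b hb => pvCell_pvSet_ne h a c w (a, b) (by simp [hb])
        refine ⟨?_, ?_, ?_, ?_, ?_, ?_, pre_pvSet _ _ _ _ hpreh⟩
        · intro p hp
          rcases List.mem_append.1 hp with hp | hp
          · exact fun hx => hdisj p hp (List.mem_cons_of_mem _ hx)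
          · simp only [List.mem_singleton] at hp
            subst hp
            exact (List.nodup_cons.1 hnd).1
        · intro b hb hbz
          have hbc : b ≠ c := fun hx => hbz (hx ▸ hgac)
          rw [hcne b hbc]; exact hra1 b hb hbz
        · intro p hp
          rcases List.mem_append.1 hp with hp | hp
          · obtain ⟨h1, h2, h3⟩ := hra2 p hp
            have hpc : p.1 ≠ c := fun hx => hdisj p hp (hx ▸ List.mem_cons_self)
            exact ⟨h1, by rw [hcne p.1 hpc]; exact h2, h3⟩
          · simp only [List.mem_singleton] at hp
            subst hp
            exact ⟨hc4, hcself, hgac⟩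
        · intro b hb hbz hbe
          by_cases hbc : b = c
          · exact ⟨(c, w), by simp, hbc.symm, by rw [hbc, hcself]⟩
          · rw [hcne b hbc] at hbe ⊢
            obtain ⟨p, hp, h1, h2⟩ := hra3 b hb hbz hbe
            exact ⟨p, List.mem_append_left _ hp, h1, h2⟩
        · intro c' hc'
          obtain ⟨h1, h2, h3⟩ := hhs c' (List.mem_cons_of_mem _ hc')
          have : c' ≠ c := fun hx => (List.nodup_cons.1 hnd).1 (hx ▸ hc')
          exact ⟨h1, h2, by rw [hcne c' this]; exact h3⟩
        · intro i hi hia b hb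
          rw [pvCell_pvSet_ne h a c w (i, b) (by simp [hia]), hoff i hi hia b hb]
      constructor
      · -- forward
        intro happ
        simp only [List.map_cons, apply?] at happ
        by_cases hguard : (([1, 2, 3, 4] : List Int).contains v && isValidMove h a c v) = true
        · rw [if_pos hguard] at happ
          obtain ⟨hg1, hg2⟩ := Bool.and_eq_true_iff.1 hguard
          have hvmem : v ∈ ([1, 2, 3, 4] : List Int) := by simpa using hg1
          obtain ⟨hd', hr1, hr2, hr3, hr5, hr6, hr7⟩ := hreest v
          obtain ⟨tail, hvs, ht, hcolok, hres⟩ :=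
            (ih (done ++ [(c, v)]) (pvSet h a c v) (List.nodup_cons.1 hnd).2
              hd' hr1 hr2 hr3 hr5 hr6 hr7 vs res).1 happ
          obtain ⟨hv1, hv2, hv3, hv4⟩ :=
            (valid_iff g g' h a rs used done c v hpreg hinv ha hra1 hra2 hra3 hoff
              hc4 hgac hhac hvmem).1 hg2
          refine ⟨(c, v) :: tail, by simp [hvs], ⟨rfl, hvmem, hv1, hv2, ht⟩, ?_, ?_⟩
          · intro p hp
            rcases List.mem_cons.1 hp with hp | hp
            · subst hp; exact ⟨hv3, hv4⟩
            · exact hcolok p hp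
          · rw [applyRow_cons]; exact hres
        · rw [if_neg hguard] at happ; cases happ
      · -- backward
        rintro ⟨tail, hvs, ht, hcolok, hres⟩
        cases tail with
        | nil => exact absurd ht (by simp [RowTailOk])
        | cons p t =>
          obtain ⟨pc, pv⟩ := p
          simp only [RowTailOk] at ht
          obtain ⟨hpc, hvmem, h1, h2, ht'⟩ := ht
          simp only [List.map_cons] at hvs
          obtain ⟨hveq, hvs'⟩ := List.cons_eq_cons.mp hvs
          have hcolhead := hcolok (pc, pv) List.mem_cons_self
          rw [hpc] at hcolhead
          rw [← hveq] at hcolhead hvmem ht' h1 h2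
          have hvalid : isValidMove h a c v = true :=
            (valid_iff g g' h a rs used done c v hpreg hinv ha hra1 hra2 hra3 hoff
              hc4 hgac hhac hvmem).2
              ⟨h1, h2, hcolhead.1, hcolhead.2⟩
          simp only [List.map_cons, apply?]
          rw [if_pos (by simp [hvalid, hvmem])]
          obtain ⟨hd', hr1, hr2, hr3, hr5, hr6, hr7⟩ := hreest v
          refine (ih (done ++ [(c, v)]) (pvSet h a c v) (List.nodup_cons.1 hnd).2
            hd' hr1 hr2 hr3 hr5 hr6 hr7 vs res).2
            ⟨t, hvs', ht', fun q hq => hcolok q (List.mem_cons_of_mem _ hq), ?_⟩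
          rw [hres, applyRow_cons, hpc, ← hveq]

-- the invariant survives committing one whole row
lemma rowsInv_step (g g' : List (List Int)) (a : Nat) (rs : List Nat)
    (used : PySem.Set (Nat × Int)) (comp : List (Nat × Int))
    (hpreg : Pre_solve g) (ha : a < 4) (hnda : a ∉ rs)
    (hinv : RowsInv g g' (a :: rs) used)
    (hrt : RowTailOk (rowPreB g a) [] (holesB g a) comp) :
    RowsInv g (applyRow a comp g') rs (PySem.Set.union used (PySem.Set.ofList comp)) := by
  obtain ⟨hpre', hrsame, hrdone, hrused⟩ := hinv
  have hcols : comp.map Prod.fst = holesB g a := rowTailOk_cols _ _ _ _ hrt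
  have hcolsnd : (comp.map Prod.fst).Nodup := by rw [hcols]; exact nodup_holesB g a
  have hlt : ∀ p ∈ comp, p.1 < 4 := by
    intro p hp
    have : p.1 ∈ holesB g a := hcols ▸ List.mem_map_of_mem hp
    exact ((mem_holesB g a p.1).1 this).1
  have hz : ∀ p ∈ comp, pvCell g a p.1 = 0 := by
    intro p hp
    have : p.1 ∈ holesB g a := hcols ▸ List.mem_map_of_mem hp
    exact ((mem_holesB g a p.1).1 this).2
  refine ⟨pre_applyRow a comp g' hpre', ?_, ?_, ?_⟩
  · intro a' ha' b hb
    have hne : a' ≠ a := fun hx => hnda (hx ▸ ha')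
    rw [pvCell_applyRow_ne_row a comp g' a' b hne]
    exact hrsame a' (List.mem_cons_of_mem _ ha') b hb
  · intro i hi hni b hb
    by_cases hia : i = a
    · subst hia
      constructor
      · intro hz'
        have hb' : b ∉ comp.map Prod.fst := by
          rw [hcols, mem_holesB]; exact fun hx => hz' hx.2
        rw [pvCell_applyRow_not_col i comp g' b hb']
        exact hrsame i List.mem_cons_self b hb
      · intro hz'
        have hb' : b ∈ comp.map Prod.fst := by rw [hcols, mem_holesB]; exact ⟨hb, hz'⟩
        obtain ⟨p, hp, hpb⟩ := List.mem_map.1 hb'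
        obtain ⟨pc, pv⟩ := p
        simp only at hpb
        subst hpb
        rw [pvCell_applyRow_mem i ha comp g' pc pv hpre' hcolsnd hlt hp]
        exact (contains_union_ofList used comp (pc, pv)).2 (Or.inr hp)
    · have hni' : i ∉ a :: rs := by
        intro hx
        rcases List.mem_cons.1 hx with hx | hx
        · exact hia hx
        · exact hni hx
      constructor
      · intro hz'
        rw [pvCell_applyRow_ne_row a comp g' i b hia]
        exact (hrdone i hi hni' b hb).1 hz'
      · intro hz'
        rw [pvCell_applyRow_ne_row a comp g' i b hia]
        exact (contains_union_ofList used comp _).2 (Or.inl ((hrdone i hi hni' b hb).2 hz'))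
  · intro c v hcv
    rcases (contains_union_ofList used comp (c, v)).1 hcv with hcv | hcv
    · obtain ⟨i, hi, hni, hz', he⟩ := hrused c v hcv
      have hia : i ≠ a := fun hx => hni (hx ▸ List.mem_cons_self)
      exact ⟨i, hi, fun hx => hni (List.mem_cons_of_mem _ hx), hz',
        by rw [pvCell_applyRow_ne_row a comp g' i c hia]; exact he⟩
    · exact ⟨a, ha, hnda, hz (c, v) hcv,
        pvCell_applyRow_mem a ha comp g' c v hpre' hcolsnd hlt hcv⟩

-- the main correspondence: B's row-level search equals A's cell-level search
lemma rowsOkB_eq_searchS (g : List (List Int)) (hpreg : Pre_solve g) :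
    ∀ rs : List Nat, rs.Nodup → (∀ a ∈ rs, a < 4) →
    ∀ (g' : List (List Int)) (used : PySem.Set (Nat × Int)), RowsInv g g' rs used →
    rowsOkB (colPre g) (rs.map (rowComps g)) used = searchS (rs.flatMap (rowZeros g)) g' := by
  intro rs
  induction rs with
  | nil => intro _ _ g' used _; rw [List.map_nil, List.flatMap_nil, rowsOkB, searchS]
  | cons a rs ih =>
    intro hnd hlt g' used hinv
    have ha : a < 4 := hlt a List.mem_cons_self
    have hnda : a ∉ rs := (List.nodup_cons.1 hnd).1
    -- committing any row completion keeps both searches in lockstep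
    have step : ∀ comp, RowTailOk (rowPreB g a) [] (holesB g a) comp →
        rowsOkB (colPre g) (rs.map (rowComps g))
          (PySem.Set.union used (PySem.Set.ofList comp)) =
        searchS (rs.flatMap (rowZeros g)) (applyRow a comp g') :=
      fun comp hrt => ih (List.nodup_cons.1 hnd).2
        (fun a' ha' => hlt a' (List.mem_cons_of_mem _ ha')) _ _
        (rowsInv_step g g' a rs used comp hpreg ha hnda hinv hrt)
    have hrow := row_apply_iff g g' a rs used hpreg hinv ha (holesB g a) [] g'
      (nodup_holesB g a) (by simp)
      (fun b hb _ => hinv.2.1 a List.mem_cons_self b hb)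
      (by simp) (fun b hb hz hne => absurd (hinv.2.1 a List.mem_cons_self b hb ▸ hz) hne)
      (fun c hc => ⟨((mem_holesB g a c).1 hc).1, ((mem_holesB g a c).1 hc).2,
        by rw [hinv.2.1 a List.mem_cons_self c ((mem_holesB g a c).1 hc).1]
           exact ((mem_holesB g a c).1 hc).2⟩)
      (fun _ _ _ _ _ => rfl) hinv.1
    rw [List.map_cons, List.flatMap_cons, rowsOkB]
    apply Bool.eq_iff_iff.2
    rw [List.any_eq_true, searchS_append_iff (rowZeros g a)]
    constructor
    · rintro ⟨comp, hcm, hok⟩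
      obtain ⟨hcolok, hrest⟩ := Bool.and_eq_true_iff.1 hok
      have hrt := (mem_rowComps g a comp).1 hcm
      refine ⟨comp.map Prod.snd, applyRow a comp g', ?_, ?_⟩
      · refine (hrow (comp.map Prod.snd) (applyRow a comp g')).2
          ⟨comp, rfl, hrt, ?_, rfl⟩
        intro p hp
        have := List.all_eq_true.1 hcolok p hp
        simp only [Bool.and_eq_true, Bool.not_eq_true'] at this
        exact this
      · rw [← step comp hrt]; exact hrest
    · rintro ⟨vs, h, happ, hs⟩
      obtain ⟨tail, -, hrt, hcolok, hres⟩ := (hrow vs h).1 happ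
      refine ⟨tail, (mem_rowComps g a tail).2 hrt, ?_⟩
      rw [Bool.and_eq_true_iff]
      constructor
      · rw [List.all_eq_true]
        intro p hp
        obtain ⟨h1, h2⟩ := hcolok p hp
        simp only [Bool.and_eq_true, Bool.not_eq_true']
        exact ⟨h1, h2⟩
      · rw [step tail hrt, ← hres]; exact hs

-- ===== VERDICT (by name: the statement is the Claim_ definition above) =====
theorem solve_spec : Claim_equal_solve := by
  intro g _ hpre
  unfold Spec_solve solve solve_alt
  rw [solveAux_eq_searchS 17 g hpre (by
    have h1 := List.length_filter_le (fun p => pvCell g p.1 p.2 == 0) pvPairs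
    have h2 : pvPairs.length = 16 := by decide
    simp only [zeros]; omega),
    zeros_eq_flatMap]
  have hinv : RowsInv g g (List.range 4) PySem.Set.empty := by
    refine ⟨hpre, fun a _ b _ => rfl, ?_, ?_⟩
    · intro i hi hni
      exact absurd (List.mem_range.2 hi) hni
    · intro c v hcv
      rw [PySem.Set.contains_iff] at hcv
      exact absurd hcv (List.not_mem_nil)
  rw [← rowsOkB_eq_searchS g hpre (List.range 4) List.nodup_range
    (fun a ha => List.mem_range.1 ha) g PySem.Set.empty hinv]
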